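-- pv_equiv track=rewrite | github.com/pldiiw/1ads-mp1 | src/pleiadis.py | get_adjacent_squares
-- ===== SOURCE A (Python) =====
-- from typing import List, Tuple, Any
--
-- Row = List[int]
--
-- Board = List[Row]
--
-- def get_adjacent_squares(board: Board, x: int, y: int) -> Row:
--     """Return a list containing the adjacent squares to the [x;y] one."""
--
--     return [
--         square
--         for row_index, row in enumerate(board)
--         for col_index, square in enumerate(row)
--         if (abs(row_index - y) <= 1 and
--             abs(col_index - x) <= 1 and
--             [row_index, col_index] != [y, x]) # We don't want the square itself.
--     ]
-- ===== SOURCE B (Python) =====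
-- def get_adjacent_squares(board, x, y):
--     """Return a list containing the adjacent squares to the [x;y] one."""
--     res = []
--     for r in (y - 1, y, y + 1):
--         if 0 <= r < len(board):
--             row = board[r]
--             for c in (x - 1, x, x + 1):
--                 if 0 <= c < len(row) and not (r == y and c == x):
--                     res.append(row[c])
--     return res
-- ===== Notes on version B (the rewrite author's own statement) =====
-- stated objective: faster
-- what changed: B indexes at most the 9 candidate neighbor cells directly (three candidate rows x three candidate columns with bounds checks) instead of scanning and filtering every cell of the board.
import Mathlib
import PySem

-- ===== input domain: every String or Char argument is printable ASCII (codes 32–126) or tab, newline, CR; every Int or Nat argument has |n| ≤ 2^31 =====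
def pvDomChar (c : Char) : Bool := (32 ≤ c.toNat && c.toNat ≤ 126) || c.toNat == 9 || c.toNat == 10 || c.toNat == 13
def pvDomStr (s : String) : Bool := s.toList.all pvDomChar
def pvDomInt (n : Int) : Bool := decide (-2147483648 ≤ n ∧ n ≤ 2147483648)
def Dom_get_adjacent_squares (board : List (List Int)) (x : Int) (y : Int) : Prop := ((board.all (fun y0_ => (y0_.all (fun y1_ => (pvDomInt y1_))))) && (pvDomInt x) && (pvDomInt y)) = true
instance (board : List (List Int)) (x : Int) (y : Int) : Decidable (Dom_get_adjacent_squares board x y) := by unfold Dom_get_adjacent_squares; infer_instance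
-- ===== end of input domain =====

-- B replaces A's full scan of the board by direct indexing of the at most 9 candidate
-- neighbor cells (three candidate rows × three candidate columns, with bounds checks): faster.

-- ===== PORT A =====
-- A: one comprehension over every cell of the board, keeping cells within distance 1
-- of (x, y) (row-major order) and dropping the cell itself.
def get_adjacent_squares (board : List (List Int)) (x : Int) (y : Int) : List Int :=
  (PySem.List.enumerate board 0).flatMap (fun p =>
    (PySem.List.enumerate p.2 0).filterMap (fun q =>
      if (p.1 - y).natAbs ≤ 1 ∧ (q.1 - x).natAbs ≤ 1 ∧ ¬(p.1 = y ∧ q.1 = x)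
      then some q.2 else none))

-- ===== PORT B =====
-- B: visit the three candidate rows y-1, y, y+1 and, in each row in range, the three
-- candidate columns x-1, x, x+1 in range, skipping (y, x) itself; indexing is guarded,
-- so pyGetD's default is never used.
def get_adjacent_squares_alt (board : List (List Int)) (x : Int) (y : Int) : List Int :=
  [y - 1, y, y + 1].foldl (fun acc r =>
    if 0 ≤ r ∧ r < (board.length : Int) then
      let row := PySem.List.pyGetD board r []
      [x - 1, x, x + 1].foldl (fun acc2 c =>
        if 0 ≤ c ∧ c < (row.length : Int) ∧ ¬(r = y ∧ c = x) then
          acc2 ++ [PySem.List.pyGetD row c 0]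
        else acc2) acc
    else acc) []

-- ===== PRECONDITION & SPEC =====
def Spec_get_adjacent_squares (board : List (List Int)) (x : Int) (y : Int) (out : List Int) : Prop := out = get_adjacent_squares_alt board x y
instance (board : List (List Int)) (x : Int) (y : Int) (out : List Int) : Decidable (Spec_get_adjacent_squares board x y out) := by unfold Spec_get_adjacent_squares; infer_instance

-- ===== CLAIM (what is proved, stated in full; the proofs are below) =====
def Claim_equal_get_adjacent_squares : Prop := ∀ (board : List (List Int)) (x : Int) (y : Int), Dom_get_adjacent_squares board x y → Spec_get_adjacent_squares board x y (get_adjacent_squares board x y)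

-- ===== LEMMAS AND PROOFS =====

theorem pv_enum_shift {α : Type} (l : List α) (s : Int) :
    PySem.List.enumerate l (s + 1) = (PySem.List.enumerate l s).map (fun q => (q.1 + 1, q.2)) := by
  induction l generalizing s with
  | nil => simp [PySem.List.enumerate_nil]
  | cons a t ih =>
      simp [PySem.List.enumerate_cons, ih]

theorem pv_pyGetD_cons_pos {α : Type} (a : α) (l : List α) (c : Int) (d : α) (hc : 0 < c) :
    PySem.List.pyGetD (a :: l) c d = PySem.List.pyGetD l (c - 1) d := by
  obtain ⟨k, rfl⟩ : ∃ k : Nat, c = (k : Int) + 1 := ⟨(c - 1).toNat, by omega⟩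
  have h1 : ((k : Int) + 1) = ((k + 1 : Nat) : Int) := by omega
  have h2 : ((k : Int) + 1 - 1) = ((k : Nat) : Int) := by omega
  rw [h2, h1, PySem.List.pyGetD_natCast, PySem.List.pyGetD_natCast]
  simp

-- The generic window lemma, used at both nesting levels: scanning an enumerated list
-- with an emission depending only on (index - x) — empty whenever |index - x| > 1 —
-- equals directly probing positions x-1, x, x+1.
theorem pv_tri {α β : Type} (h : Int → α → List β)
    (hz : ∀ d a, 1 < d.natAbs → h d a = []) (d0 : α) :
    ∀ (l : List α) (x : Int),
    (PySem.List.enumerate l 0).flatMap (fun q => h (q.1 - x) q.2)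
    = (if 0 ≤ x - 1 ∧ x - 1 < (l.length : Int) then h (-1) (PySem.List.pyGetD l (x - 1) d0) else [])
      ++ (if 0 ≤ x ∧ x < (l.length : Int) then h 0 (PySem.List.pyGetD l x d0) else [])
      ++ (if 0 ≤ x + 1 ∧ x + 1 < (l.length : Int) then h 1 (PySem.List.pyGetD l (x + 1) d0) else []) := by
  intro l
  induction l with
  | nil =>
      intro x
      rw [PySem.List.enumerate_nil]
      rw [if_neg (by simp only [List.length_nil, Nat.cast_zero]; omega),
          if_neg (by simp only [List.length_nil, Nat.cast_zero]; omega),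
          if_neg (by simp only [List.length_nil, Nat.cast_zero]; omega)]
      simp
  | cons a t ih =>
      intro x
      have shift : (PySem.List.enumerate t 1).flatMap (fun q => h (q.1 - x) q.2)
          = (PySem.List.enumerate t 0).flatMap (fun q => h (q.1 - (x - 1)) q.2) := by
        rw [show (1 : Int) = 0 + 1 by ring, pv_enum_shift, List.flatMap_map]
        congr 1
        funext q
        show h (q.1 + 1 - x) q.2 = _
        congr 1
        ring
      rw [PySem.List.enumerate_cons, List.flatMap_cons]
      simp only [zero_add]
      rw [shift, ih (x - 1)]
      simp only [List.length_cons]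
      push_cast
      rcases lt_trichotomy x (-1) with hx | hx | hx
      · -- x ≤ -2 : everything empty
        rw [hz _ _ (by omega)]
        split_ifs <;> first | (exfalso; omega) | simp
      · -- x = -1
        subst hx
        split_ifs <;>
          first
            | (exfalso; omega)
            | norm_num [pv_pyGetD_cons_pos, PySem.List.pyGetD_zero_cons]
      · rcases lt_trichotomy x 1 with hx2 | hx2 | hx2
        · -- x = 0
          have hx0 : x = 0 := by omega
          subst hx0
          split_ifs <;>
            first
              | (exfalso; omega)
              | norm_num [pv_pyGetD_cons_pos, PySem.List.pyGetD_zero_cons]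
        · -- x = 1
          subst hx2
          split_ifs <;>
            first
              | (exfalso; omega)
              | norm_num [pv_pyGetD_cons_pos, PySem.List.pyGetD_zero_cons]
        · -- x ≥ 2
          rw [hz _ _ (by omega)]
          rw [pv_pyGetD_cons_pos a t (x - 1) d0 (by omega),
              pv_pyGetD_cons_pos a t x d0 (by omega),
              pv_pyGetD_cons_pos a t (x + 1) d0 (by omega)]
          rw [show x - 1 + 1 = x + 1 - 1 from by ring]
          have i1 : ((0:Int) ≤ x - 1 - 1 ∧ x - 1 - 1 < (t.length : Int)) ↔
              ((0:Int) ≤ x - 1 ∧ x - 1 < (t.length : Int) + 1) := by omega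
          have i2 : ((0:Int) ≤ x - 1 ∧ x - 1 < (t.length : Int)) ↔
              ((0:Int) ≤ x ∧ x < (t.length : Int) + 1) := by omega
          have i3 : ((0:Int) ≤ x + 1 - 1 ∧ x + 1 - 1 < (t.length : Int)) ↔
              ((0:Int) ≤ x + 1 ∧ x + 1 < (t.length : Int) + 1) := by omega
          rw [show ([] : List β) ++ _ = _ from List.nil_append _]
          simp only [i1, i2, i3]

-- A's inner comprehension as a function of d = row_index - y.
def pvInner (x : Int) (d : Int) (row : List Int) : List Int :=
  (PySem.List.enumerate row 0).filterMap (fun q =>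
    if d.natAbs ≤ 1 ∧ (q.1 - x).natAbs ≤ 1 ∧ ¬(d = 0 ∧ q.1 = x) then some q.2 else none)

theorem pv_filterMap_if {α β : Type} (l : List α) (C : α → Prop) [DecidablePred C] (f : α → β) :
    l.filterMap (fun a => if C a then some (f a) else none)
    = l.flatMap (fun a => if C a then [f a] else []) := by
  induction l with
  | nil => simp
  | cons a t ih =>
      simp only [List.filterMap_cons, List.flatMap_cons]
      split_ifs <;> simp [ih]

theorem pv_A_eq (board : List (List Int)) (x y : Int) :
    get_adjacent_squares board x y
    = (PySem.List.enumerate board 0).flatMap (fun p => pvInner x (p.1 - y) p.2) := by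
  simp only [get_adjacent_squares, pvInner, sub_eq_zero]

theorem pvInner_empty (x d : Int) (row : List Int) (hd : 1 < d.natAbs) :
    pvInner x d row = [] := by
  simp only [pvInner, List.filterMap_eq_nil_iff]
  intro q hq
  rw [if_neg]
  intro hc
  omega

theorem pv_fold3 {β : Type} (C : Int → Prop) [DecidablePred C] (g : Int → β)
    (u v w : Int) (acc : List β) :
    [u, v, w].foldl (fun a c => if C c then a ++ [g c] else a) acc
    = acc ++ ((if C u then [g u] else []) ++ (if C v then [g v] else [])
        ++ (if C w then [g w] else [])) := by
  simp only [List.foldl_cons, List.foldl_nil]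
  split_ifs <;> simp

-- pvInner at d = ±1 (not the probed row itself): keep every in-range column x-1, x, x+1.
theorem pvInner_ns (x d : Int) (row : List Int) (hd : d = -1 ∨ d = 1) :
    pvInner x d row
    = (if 0 ≤ x - 1 ∧ x - 1 < (row.length : Int) then [PySem.List.pyGetD row (x - 1) 0] else [])
      ++ (if 0 ≤ x ∧ x < (row.length : Int) then [PySem.List.pyGetD row x 0] else [])
      ++ (if 0 ≤ x + 1 ∧ x + 1 < (row.length : Int) then [PySem.List.pyGetD row (x + 1) 0] else []) := by
  unfold pvInner
  rw [pv_filterMap_if (PySem.List.enumerate row 0)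
      (fun q : Int × Int => d.natAbs ≤ 1 ∧ (q.1 - x).natAbs ≤ 1 ∧ ¬(d = 0 ∧ q.1 = x))
      (fun q : Int × Int => q.2)]
  have hcond : (fun q : Int × Int =>
      if d.natAbs ≤ 1 ∧ (q.1 - x).natAbs ≤ 1 ∧ ¬(d = 0 ∧ q.1 = x) then [q.2] else [])
      = (fun q : Int × Int => (fun e (a : Int) => if e.natAbs ≤ 1 then [a] else []) (q.1 - x) q.2) := by
    funext q
    rcases hd with hd | hd <;> subst hd <;>
      · by_cases hc : (q.1 - x).natAbs ≤ 1
        · rw [if_pos (by refine ⟨by omega, hc, ?_⟩; intro hh; omega)]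
          simp [hc]
        · rw [if_neg (by intro hh; exact hc hh.2.1)]
          simp [hc]
  rw [hcond]
  rw [pv_tri (fun e (a : Int) => if e.natAbs ≤ 1 then [a] else [])
      (by intro e a he
          show (if e.natAbs ≤ 1 then [a] else []) = []
          rw [if_neg]; omega) 0 row x]
  norm_num

-- pvInner at d = 0 (the probed row): skip column x itself.
theorem pvInner_s (x : Int) (row : List Int) :
    pvInner x 0 row
    = (if 0 ≤ x - 1 ∧ x - 1 < (row.length : Int) then [PySem.List.pyGetD row (x - 1) 0] else [])
      ++ (if 0 ≤ x + 1 ∧ x + 1 < (row.length : Int) then [PySem.List.pyGetD row (x + 1) 0] else []) := by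
  unfold pvInner
  rw [pv_filterMap_if (PySem.List.enumerate row 0)
      (fun q : Int × Int => (0:Int).natAbs ≤ 1 ∧ (q.1 - x).natAbs ≤ 1 ∧ ¬((0:Int) = 0 ∧ q.1 = x))
      (fun q : Int × Int => q.2)]
  have hcond : (fun q : Int × Int =>
      if (0:Int).natAbs ≤ 1 ∧ (q.1 - x).natAbs ≤ 1 ∧ ¬((0:Int) = 0 ∧ q.1 = x) then [q.2] else [])
      = (fun q : Int × Int =>
          (fun e (a : Int) => if e.natAbs ≤ 1 ∧ ¬(e = 0) then [a] else []) (q.1 - x) q.2) := by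
    funext q
    by_cases hc : (q.1 - x).natAbs ≤ 1 ∧ ¬(q.1 - x = 0)
    · rw [if_pos (by refine ⟨by omega, hc.1, ?_⟩; intro hh; exact hc.2 (by omega))]
      show [q.2] = (if (q.1 - x).natAbs ≤ 1 ∧ ¬(q.1 - x = 0) then [q.2] else [])
      rw [if_pos hc]
    · rw [if_neg (by intro hh; exact hc ⟨hh.2.1, fun hz0 => hh.2.2 ⟨rfl, by omega⟩⟩)]
      show ([] : List Int) = (if (q.1 - x).natAbs ≤ 1 ∧ ¬(q.1 - x = 0) then [q.2] else [])
      rw [if_neg hc]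
  rw [hcond]
  rw [pv_tri (fun e (a : Int) => if e.natAbs ≤ 1 ∧ ¬(e = 0) then [a] else [])
      (by intro e a he
          show (if e.natAbs ≤ 1 ∧ ¬(e = 0) then [a] else []) = []
          rw [if_neg]; intro hh; omega) 0 row x]
  norm_num

theorem pv_outer3 (P : Int → Prop) [DecidablePred P] (G : Int → List Int → List Int)
    (hG : ∀ r acc, G r acc = acc ++ G r []) (u v w : Int) :
    [u, v, w].foldl (fun acc r => if P r then G r acc else acc) []
    = (if P u then G u [] else []) ++ ((if P v then G v [] else [])
        ++ (if P w then G w [] else [])) := by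
  simp only [List.foldl_cons, List.foldl_nil]
  split_ifs <;> (try rw [hG w]) <;> (try rw [hG v]) <;> simp

theorem pv_main (board : List (List Int)) (x y : Int) :
    get_adjacent_squares board x y = get_adjacent_squares_alt board x y := by
  rw [pv_A_eq]
  rw [pv_tri (pvInner x) (fun d r hd => pvInner_empty x d r hd) [] board y]
  rw [pvInner_ns x (-1) _ (Or.inl rfl), pvInner_ns x 1 _ (Or.inr rfl), pvInner_s]
  simp only [get_adjacent_squares_alt]
  rw [pv_outer3 (fun r => 0 ≤ r ∧ r < (board.length : Int))
      (fun r acc => [x - 1, x, x + 1].foldl (fun acc2 c =>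
        if 0 ≤ c ∧ c < ((PySem.List.pyGetD board r []).length : Int) ∧ ¬(r = y ∧ c = x) then
          acc2 ++ [PySem.List.pyGetD (PySem.List.pyGetD board r []) c 0]
        else acc2) acc)
      (by intro r acc
          beta_reduce
          rw [pv_fold3, pv_fold3]
          simp) (y - 1) y (y + 1)]
  rw [pv_fold3, pv_fold3, pv_fold3]
  simp only [List.nil_append]
  have c1 : ∀ c : Int, (0 ≤ c ∧ c < ((PySem.List.pyGetD board (y - 1) []).length : Int)
      ∧ ¬(y - 1 = y ∧ c = x)) ↔ (0 ≤ c ∧ c < ((PySem.List.pyGetD board (y - 1) []).length : Int)) := by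
    intro c; constructor
    · intro hh; exact ⟨hh.1, hh.2.1⟩
    · intro hh; exact ⟨hh.1, hh.2, by intro hh2; omega⟩
  have c3 : ∀ c : Int, (0 ≤ c ∧ c < ((PySem.List.pyGetD board (y + 1) []).length : Int)
      ∧ ¬(y + 1 = y ∧ c = x)) ↔ (0 ≤ c ∧ c < ((PySem.List.pyGetD board (y + 1) []).length : Int)) := by
    intro c; constructor
    · intro hh; exact ⟨hh.1, hh.2.1⟩
    · intro hh; exact ⟨hh.1, hh.2, by intro hh2; omega⟩
  simp only [c1 (x - 1), c1 (x + 1), c3 (x - 1), c3 (x + 1)]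
  simp [List.append_assoc]

-- ===== VERDICT (by name: the statement is the Claim_ definition above) =====
theorem get_adjacent_squares_spec : Claim_equal_get_adjacent_squares := by
  intro board x y _
  exact pv_main board x y
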